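-- pv_equiv track=rewrite | github.com/mrhappyasthma/IsThisStockGood | main.py | jsonpToCSV
-- ===== SOURCE A (Python) =====
-- def jsonpToCSV(s):
--   arr = []
--   ignore = False
--   printing = False
--   s = s.replace(',', '')
--   s = s.replace('\/', '/')
--   s = s.replace('&amp', '&')
--   s = s.replace('&nbsp;', ' ')
--   s = s.replace('</tr>', '\n')
--   for c in s:
--     if c == '<':
--       ignore = True
--       printing = False
--       continue
--     elif c == '>':
--       ignore = False
--       printing = False
--       continue
--     elif not ignore:
--       if not printing:
--         printing = True
--         arr.append(',')
--       arr.append(c)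
--   output = ''.join(arr)
--   output = output.replace('\n,', '\n')
--   output = output.replace(',\n', '\n')
--   output = output.replace(' ,', ' ')
--   output = output.replace('&mdash;', '')
--   if len(output) == 0:
--     return ''
--   return output[1:] if output[0] == ',' else output
-- ===== SOURCE B (Python) =====
-- def jsonpToCSV(s):
--   s = s.replace(',', '')
--   s = s.replace('\/', '/')
--   s = s.replace('&amp', '&')
--   s = s.replace('&nbsp;', ' ')
--   s = s.replace('</tr>', '\n')
--   parts = []
--   i = 0
--   n = len(s)
--   while i < n:
--     c = s[i]
--     if c == '<':
--       j = s.find('>', i + 1)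
--       i = n if j < 0 else j + 1
--     elif c == '>':
--       i += 1
--     else:
--       j = i + 1
--       while j < n and s[j] != '<' and s[j] != '>':
--         j += 1
--       parts.append(',' + s[i:j])
--       i = j
--   output = ''.join(parts)
--   output = output.replace('\n,', '\n')
--   output = output.replace(',\n', '\n')
--   output = output.replace(' ,', ' ')
--   output = output.replace('&mdash;', '')
--   if len(output) == 0:
--     return ''
--   return output[1:] if output[0] == ',' else output
-- ===== Notes on version B (the rewrite author's own statement) =====
-- stated objective: alternative
-- what changed: Replaced the character-level ignore/printing state machine with an index-jumping tokenizer: it skips each whole tag via find, treats a stray closing bracket as a delimiter, extracts every maximal text run as a slice and emits it with a leading comma, carrying no per-character state.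
import Mathlib
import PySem

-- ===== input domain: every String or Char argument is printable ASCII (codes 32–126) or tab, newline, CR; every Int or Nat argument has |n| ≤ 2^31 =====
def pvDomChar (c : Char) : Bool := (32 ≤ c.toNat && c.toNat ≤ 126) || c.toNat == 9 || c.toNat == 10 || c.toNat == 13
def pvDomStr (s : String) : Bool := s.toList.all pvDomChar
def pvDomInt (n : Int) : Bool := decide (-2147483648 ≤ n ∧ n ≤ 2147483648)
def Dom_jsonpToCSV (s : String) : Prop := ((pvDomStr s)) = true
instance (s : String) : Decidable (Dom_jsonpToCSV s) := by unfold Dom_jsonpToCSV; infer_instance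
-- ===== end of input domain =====

-- B replaces A's char-by-char ignore/printing state machine by a tokenizer that jumps over
-- whole tags and extracts maximal text runs as slices; same cost, no per-char state.

-- ===== PORT A =====
-- the five leading .replace calls (shared verbatim by both Pythons)
def preClean (s : String) : String :=
  PySem.Str.replace (PySem.Str.replace (PySem.Str.replace (PySem.Str.replace
    (PySem.Str.replace s "," "") "\\/" "/") "&amp" "&") "&nbsp;" " ") "</tr>" "\n"

-- the four trailing .replace calls, the empty guard and the leading-comma strip (shared verbatim)
def postClean (t : String) : String :=
  let o := PySem.Str.replace (PySem.Str.replace (PySem.Str.replace (PySem.Str.replace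
    t "\n," "\n") ",\n" "\n") " ," " ") "&mdash;" ""
  match o.toList with
  | [] => ""
  | c :: rest => if c = ',' then String.mk rest else o

-- A's for-loop over the characters, with its two Booleans ignore/printing
def loopA : List Char → Bool → Bool → List Char
  | [], _, _ => []
  | c :: cs, ig, pr =>
    if c = '<' then loopA cs true false
    else if c = '>' then loopA cs false false
    else if ig then loopA cs ig pr
    else if pr then c :: loopA cs ig pr
    else ',' :: c :: loopA cs ig true

def jsonpToCSV (s : String) : String :=
  postClean (String.mk (loopA (preClean s).toList false false))

-- ===== PORT B =====
-- Source B: i = n if s.find('>', i+1) < 0 else j+1 — as a list this is "drop through the first '>'"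
def skipTag : List Char → List Char
  | [] => []
  | c :: cs => if c = '>' then cs else skipTag cs

-- text characters: Source B's  s[j] != '<' and s[j] != '>'
def pvText (c : Char) : Bool := c != '<' && c != '>'

theorem skipTag_length_le (cs : List Char) : (skipTag cs).length ≤ cs.length := by
  induction cs with
  | nil => simp [skipTag]
  | cons c cs ih => simp only [skipTag]; split <;> simp <;> omega

-- Source B's while loop: each iteration either skips a tag, skips a stray '>', or appends ','+run
def tok : List Char → List (List Char)
  | [] => []
  | c :: cs =>
    if c = '<' then tok (skipTag cs)
    else if c = '>' then tok cs
    else (',' :: c :: cs.takeWhile pvText) :: tok (cs.dropWhile pvText)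
termination_by l => l.length
decreasing_by
  · exact Nat.lt_succ_of_le (skipTag_length_le cs)
  · exact Nat.lt_succ_of_le (Nat.le_refl _)
  · exact Nat.lt_succ_of_le (cs.length_dropWhile_le _)

def jsonpToCSV_alt (s : String) : String :=
  postClean (String.mk (tok (preClean s).toList).flatten)

-- ===== PRECONDITION & SPEC =====
def Spec_jsonpToCSV (s : String) (out : String) : Prop := out = jsonpToCSV_alt s
instance (s : String) (out : String) : Decidable (Spec_jsonpToCSV s out) := by unfold Spec_jsonpToCSV; infer_instance

-- ===== CLAIM (what is proved, stated in full; the proofs are below) =====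
def Claim_equal_jsonpToCSV : Prop := ∀ (s : String), Dom_jsonpToCSV s → Spec_jsonpToCSV s (jsonpToCSV s)

-- ===== LEMMAS AND PROOFS =====

-- while ignore is set, A drops every character up to and including the next '>'
theorem loopA_ignore (cs : List Char) (pr : Bool) :
    loopA cs true pr = loopA (skipTag cs) false false := by
  induction cs generalizing pr with
  | nil => simp [loopA, skipTag]
  | cons c cs ih =>
    by_cases h1 : c = '<'
    · simp [loopA, skipTag, h1, ih]
    · by_cases h2 : c = '>'
      · simp [loopA, skipTag, h1, h2]
      · simp [loopA, skipTag, h1, h2, ih]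

-- the state machine from (ignore=False, printing) equals the tokenizer's rendering
theorem loopA_eq_tok_aux : ∀ (n : Nat) (cs : List Char), cs.length ≤ n →
    loopA cs false false = (tok cs).flatten ∧
    loopA cs false true = cs.takeWhile pvText ++ (tok (cs.dropWhile pvText)).flatten := by
  intro n
  induction n with
  | zero =>
    intro cs h
    have : cs = [] := List.eq_nil_of_length_eq_zero (Nat.le_zero.mp h)
    subst this; simp [loopA, tok]
  | succ n ih =>
    intro cs h
    match cs with
    | [] => simp [loopA, tok]
    | c :: cs =>
      simp only [List.length_cons, Nat.succ_le_succ_iff] at h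
      by_cases h1 : c = '<'
      · have := (ih (skipTag cs) (le_trans (skipTag_length_le cs) h)).1
        simp [loopA, tok, h1, pvText, loopA_ignore, this]
      · by_cases h2 : c = '>'
        · have := (ih cs h).1
          simp [loopA, tok, h1, h2, pvText, this]
        · have htxt : pvText c = true := by simp [pvText, h1, h2]
          have := (ih cs h).2
          constructor
          · simp [loopA, tok, h1, h2, this]
          · simp [loopA, tok, h1, h2, htxt, this]

-- ===== VERDICT (by name: the statement is the Claim_ definition above) =====
theorem jsonpToCSV_spec : Claim_equal_jsonpToCSV := by
  intro s _
  unfold Spec_jsonpToCSV jsonpToCSV jsonpToCSV_alt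
  rw [(loopA_eq_tok_aux (preClean s).toList.length (preClean s).toList le_rfl).1]
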